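-- pv_equiv track=rewrite | github.com/dwlee1/ARP_convert | scripts/skeleton_detection.py | order_bones_by_hierarchy
-- ===== SOURCE A (Python) =====
-- from collections import defaultdict
--
-- def order_bones_by_hierarchy(bone_names, bone_data):
--     """
--     parent -> child 순서를 보장하도록 본 이름을 하이어라키 기준으로 정렬.
--     같은 depth의 형제 순서는 입력 순서를 유지한다.
--
--     Args:
--         bone_names: 정렬할 본 이름 리스트
--         bone_data: {bone_name: {'parent': parent_name, ...}} 형식의 dict
--
--     Returns:
--         list[str]: 부모가 항상 자식보다 먼저 오는 순서
--     """
--     if not bone_names: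
--         return []
--
--     ordered_input = []
--     seen = set()
--     for bone_name in bone_names:
--         if bone_name and bone_name not in seen:
--             ordered_input.append(bone_name)
--             seen.add(bone_name)
--
--     index_map = {name: idx for idx, name in enumerate(ordered_input)}
--     bone_set = set(ordered_input)
--     children_map = defaultdict(list)
--     roots = []
--     missing = []
--
--     for bone_name in ordered_input:
--         info = bone_data.get(bone_name)
--         if info is None:
--             missing.append(bone_name)
--             continue
--
--         parent_name = info.get("parent")
--         if parent_name in bone_set and parent_name != bone_name:
--             children_map[parent_name].append(bone_name)
--         else:
--             roots.append(bone_name)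
--
--     def sort_key(name):
--         return (index_map.get(name, 10**9), name)
--
--     roots.sort(key=sort_key)
--     for child_names in children_map.values():
--         child_names.sort(key=sort_key)
--
--     ordered = []
--     visited = set()
--
--     def visit(bone_name):
--         if bone_name in visited:
--             return
--         visited.add(bone_name)
--         ordered.append(bone_name)
--         for child_name in children_map.get(bone_name, []):
--             visit(child_name)
--
--     for bone_name in roots:
--         visit(bone_name)
--
--     remaining = [name for name in ordered_input if name not in visited and name not in missing]
--     remaining.sort(key=sort_key)
--     for bone_name in remaining:
--         visit(bone_name)
--
--     for bone_name in missing: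
--         if bone_name not in visited:
--             ordered.append(bone_name)
--             visited.add(bone_name)
--
--     return ordered
-- ===== SOURCE B (Python) =====
-- def order_bones_by_hierarchy(bone_names, bone_data):
--     order = list(dict.fromkeys(n for n in bone_names if n))
--     known = set(order)
--
--     def real_parent(n):
--         p = bone_data.get(n, {}).get("parent")
--         return p if p in known and p != n else None
--
--     missing = [n for n in order if bone_data.get(n) is None]
--     present = [n for n in order if bone_data.get(n) is not None]
--     roots = [n for n in present if real_parent(n) is None]
--     children = {}
--     for n in present:
--         p = real_parent(n)
--         if p is not None:
--             children.setdefault(p, []).append(n)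
--
--     ordered = []
--     visited = set()
--
--     def dfs(seed):
--         stack = [seed]
--         while stack:
--             n = stack.pop()
--             if n in visited:
--                 continue
--             visited.add(n)
--             ordered.append(n)
--             for c in reversed(children.get(n, [])):
--                 stack.append(c)
--
--     for n in roots:
--         dfs(n)
--     for n in present:
--         dfs(n)
--     return ordered + missing
-- ===== Notes on version B (the rewrite author's own statement) =====
-- stated objective: faster
-- what changed: B replaces A's recursive visited-guarded DFS with an explicit-stack iterative preorder DFS (children pushed in reverse), drops the index_map/sort_key machinery and all three sort passes (provably no-ops: every list A sorts is already in input-index order), and replaces A's remaining-pass 'name not in missing' linear list scan and final missing loop by dict-based filters and a plain concatenation.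
import Mathlib
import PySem

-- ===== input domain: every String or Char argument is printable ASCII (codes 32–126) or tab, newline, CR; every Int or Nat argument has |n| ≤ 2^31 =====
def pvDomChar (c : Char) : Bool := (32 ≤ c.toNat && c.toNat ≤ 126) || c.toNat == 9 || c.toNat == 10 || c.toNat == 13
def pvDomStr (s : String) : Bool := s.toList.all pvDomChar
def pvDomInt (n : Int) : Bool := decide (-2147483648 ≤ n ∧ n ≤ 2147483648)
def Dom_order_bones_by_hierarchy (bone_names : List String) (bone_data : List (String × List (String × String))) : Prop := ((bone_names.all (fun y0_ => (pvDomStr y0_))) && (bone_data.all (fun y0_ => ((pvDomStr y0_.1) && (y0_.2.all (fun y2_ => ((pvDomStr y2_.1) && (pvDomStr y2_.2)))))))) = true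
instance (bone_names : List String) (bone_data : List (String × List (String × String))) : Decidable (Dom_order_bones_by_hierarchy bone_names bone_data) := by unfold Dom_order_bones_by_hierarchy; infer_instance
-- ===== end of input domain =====

-- B replaces A's recursive DFS by an explicit-stack DFS, drops the index_map/sort passes
-- (provably no-ops: every sorted list is already in input order) and avoids A's per-name linear
-- scan of the `missing` list (A's quadratic term); return value only, no argument is mutated.

-- ===== PORT A =====
-- A's inner `visit`: recursive preorder DFS guarded by `visited`.  The fuel argument is only a
-- totality device (Python's recursion terminates because `visited` grows); it is sized by the
-- caller so that it is never exhausted.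
def visitA (ch : String → List String) (fuel : Nat) (n : String)
    (st : PySem.Set String × List String) : PySem.Set String × List String :=
  if PySem.Set.contains st.1 n then st
  else
    match fuel with
    | 0 => st
    | Nat.succ f => (ch n).foldl (fun s m => visitA ch f m s) (PySem.Set.add st.1 n, st.2 ++ [n])
termination_by fuel

def order_bones_by_hierarchy (bone_names : List String) (bone_data : List (String × List (String × String))) : List String :=
  if bone_names = [] then []
  else
    let di : PySem.Dict String (List (String × String)) := ⟨bone_data⟩
    let acc := bone_names.foldl
      (fun (acc : List String × PySem.Set String) n =>
        if !(n == "") && !(PySem.Set.contains acc.2 n) then (acc.1 ++ [n], PySem.Set.add acc.2 n)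
        else acc)
      ([], PySem.Set.empty)
    let ordered_input := acc.1
    let index_map : PySem.Dict String Int :=
      (PySem.List.enumerate ordered_input).foldl (fun d p => d.insert p.2 p.1) ⟨[]⟩
    let bone_set := PySem.Set.ofList ordered_input
    let cls := ordered_input.foldl
      (fun (acc : PySem.Dict String (List String) × List String × List String) n =>
        match PySem.Dict.get? di n with
        | none => (acc.1, acc.2.1, acc.2.2 ++ [n])
        | some info =>
          match PySem.Dict.get? (⟨info⟩ : PySem.Dict String String) "parent" with
          | some p =>
            if PySem.Set.contains bone_set p && !(p == n) then
              (acc.1.modify p [] (· ++ [n]), acc.2.1, acc.2.2)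
            else (acc.1, acc.2.1 ++ [n], acc.2.2)
          | none => (acc.1, acc.2.1 ++ [n], acc.2.2))
      (⟨[]⟩, [], [])
    let sortKey1 : String → Int := fun name => index_map.getD name (10 ^ 9)
    let roots := PySem.List.sorted2 cls.2.1 sortKey1 (fun name => name)
    let children_map : PySem.Dict String (List String) :=
      ⟨cls.1.items.map (fun kv => (kv.1, PySem.List.sorted2 kv.2 sortKey1 (fun name => name)))⟩
    let missing := cls.2.2
    let chF := fun n => children_map.getD n []
    let fuel := ordered_input.length + 1
    let st1 := roots.foldl (fun st n => visitA chF fuel n st) (PySem.Set.empty, [])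
    let remaining := PySem.List.sorted2
      (ordered_input.filter (fun n => !(PySem.Set.contains st1.1 n) && !(missing.contains n)))
      sortKey1 (fun name => name)
    let st2 := remaining.foldl (fun st n => visitA chF fuel n st) st1
    let st3 := missing.foldl
      (fun st n => if PySem.Set.contains st.1 n then st else (PySem.Set.add st.1 n, st.2 ++ [n])) st2
    st3.2

-- ===== PORT B =====
-- B's inner `dfs`: explicit-stack iterative preorder DFS.  The stack is kept top-first here, so
-- Python's `for c in reversed(children.get(n, [])): stack.append(c)` becomes `ch n ++ rest`.
-- The fuel argument is only a totality device, sized by the caller so that it is never exhausted.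
def dfsB (ch : String → List String) (fuel : Nat) (stack : List String)
    (st : PySem.Set String × List String) : PySem.Set String × List String :=
  match stack with
  | [] => st
  | n :: rest =>
    if PySem.Set.contains st.1 n then dfsB ch fuel rest st
    else
      match fuel with
      | 0 => st
      | Nat.succ f => dfsB ch f (ch n ++ rest) (PySem.Set.add st.1 n, st.2 ++ [n])
termination_by (fuel, stack.length)

def order_bones_by_hierarchy_alt (bone_names : List String) (bone_data : List (String × List (String × String))) : List String :=
  let order := PySem.List.dedup (bone_names.filter (fun n => !(n == "")))
  let known := PySem.Set.ofList order
  let realParent : String → Option String := fun n =>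
    match PySem.Dict.get? (⟨PySem.Dict.getD (⟨bone_data⟩ : PySem.Dict String (List (String × String))) n []⟩ : PySem.Dict String String) "parent" with
    | some p => if PySem.Set.contains known p && !(p == n) then some p else none
    | none => none
  let missing := order.filter (fun n => (PySem.Dict.get? (⟨bone_data⟩ : PySem.Dict String (List (String × String))) n).isNone)
  let present := order.filter (fun n => !(PySem.Dict.get? (⟨bone_data⟩ : PySem.Dict String (List (String × String))) n).isNone)
  let roots := present.filter (fun n => (realParent n).isNone)
  let children := present.foldl
    (fun (d : PySem.Dict String (List String)) n =>
      match realParent n with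
      | some p => (d.setdefault p []).modify p [] (· ++ [n])
      | none => d)
    ⟨[]⟩
  let chF := fun n => children.getD n []
  let fuel := order.length + 1
  let st1 := roots.foldl (fun st n => dfsB chF fuel [n] st) (PySem.Set.empty, [])
  let st2 := present.foldl (fun st n => dfsB chF fuel [n] st) st1
  st2.2 ++ missing

-- ===== PRECONDITION & SPEC =====
def Spec_order_bones_by_hierarchy (bone_names : List String) (bone_data : List (String × List (String × String))) (out : List String) : Prop := out = order_bones_by_hierarchy_alt bone_names bone_data
instance (bone_names : List String) (bone_data : List (String × List (String × String))) (out : List String) : Decidable (Spec_order_bones_by_hierarchy bone_names bone_data out) := by unfold Spec_order_bones_by_hierarchy; infer_instance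

-- ===== CLAIM (what is proved, stated in full; the proofs are below) =====
def Claim_equal_order_bones_by_hierarchy : Prop := ∀ (bone_names : List String) (bone_data : List (String × List (String × String))), Dom_order_bones_by_hierarchy bone_names bone_data → Spec_order_bones_by_hierarchy bone_names bone_data (order_bones_by_hierarchy bone_names bone_data)


-- ===== LEMMAS AND PROOFS =====

-- unfolding equations for visitA

theorem pv_not_mem_of_contains_false {s : PySem.Set String} {x : String}
    (h : PySem.Set.contains s x = false) : x ∉ s := by
  intro hm
  rw [← PySem.Set.contains_iff] at hm
  rw [h] at hm
  exact absurd hm (by simp)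

theorem visitA_visited (ch : String → List String) (f : Nat) (n : String)
    (st : PySem.Set String × List String) (h : PySem.Set.contains st.1 n = true) :
    visitA ch f n st = st := by
  rw [visitA.eq_def, if_pos h]

theorem visitA_zero (ch : String → List String) (n : String)
    (st : PySem.Set String × List String) :
    visitA ch 0 n st = st := by
  rw [visitA.eq_def]; split <;> rfl

theorem visitA_succ (ch : String → List String) (f : Nat) (n : String)
    (st : PySem.Set String × List String) (h : PySem.Set.contains st.1 n = false) :
    visitA ch (f + 1) n st
      = (ch n).foldl (fun s m => visitA ch f m s) (PySem.Set.add st.1 n, st.2 ++ [n]) := by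
  rw [visitA.eq_def, if_neg (fun hm => by rw [hm] at h; exact absurd h (by simp))]

-- visited marks only grow
theorem visitA_contains_mono (ch : String → List String) :
    ∀ (f : Nat) (n x : String) (st : PySem.Set String × List String),
      PySem.Set.contains st.1 x = true → PySem.Set.contains (visitA ch f n st).1 x = true := by
  intro f
  induction f with
  | zero => intro n x st h; rw [visitA_zero]; exact h
  | succ f ih =>
    intro n x st h
    by_cases hc : PySem.Set.contains st.1 n = true
    · rw [visitA_visited _ _ _ _ hc]; exact h
    · rw [visitA_succ _ _ _ _ (by simpa using hc)]
      have hx : PySem.Set.contains (PySem.Set.add st.1 n) x = true := by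
        rw [PySem.Set.contains_iff] at h ⊢
        exact (PySem.Set.mem_add _ _ _).2 (Or.inl h)
      generalize hst : (PySem.Set.add st.1 n, st.2 ++ [n]) = st'
      have hx' : PySem.Set.contains st'.1 x = true := by rw [← hst]; exact hx
      clear hst hc h hx
      induction ch n generalizing st' with
      | nil => exact hx'
      | cons m ms ihm => exact ihm _ (ih _ _ _ hx')


-- unfolding equations for dfsB
theorem dfsB_nil (ch : String → List String) (f : Nat) (st : PySem.Set String × List String) :
    dfsB ch f [] st = st := by
  rw [dfsB.eq_def]

theorem dfsB_cons_visited (ch : String → List String) (f : Nat) (n : String) (rest : List String)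
    (st : PySem.Set String × List String) (h : PySem.Set.contains st.1 n = true) :
    dfsB ch f (n :: rest) st = dfsB ch f rest st := by
  rw [dfsB.eq_def]
  exact if_pos h

theorem dfsB_cons_new (ch : String → List String) (f : Nat) (n : String) (rest : List String)
    (st : PySem.Set String × List String) (h : PySem.Set.contains st.1 n = false) :
    dfsB ch (f + 1) (n :: rest) st
      = dfsB ch f (ch n ++ rest) (PySem.Set.add st.1 n, st.2 ++ [n]) := by
  rw [dfsB.eq_def]
  exact if_neg (fun hm => by rw [hm] at h; exact absurd h (by simp))

-- the number of universe elements not yet visited (drives fuel sufficiency)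
def remCnt (U : List String) (v : PySem.Set String) : Nat :=
  (U.filter (fun x => !(PySem.Set.contains v x))).length

theorem remCnt_le_length (U : List String) (v : PySem.Set String) : remCnt U v ≤ U.length :=
  List.length_filter_le _ _

theorem remCnt_le_of_mono (U : List String) {v w : PySem.Set String}
    (h : ∀ x, PySem.Set.contains v x = true → PySem.Set.contains w x = true) :
    remCnt U w ≤ remCnt U v := by
  unfold remCnt
  rw [← List.countP_eq_length_filter, ← List.countP_eq_length_filter]
  apply List.countP_mono_left
  intro x _ hx
  simp only [Bool.not_eq_eq_eq_not, Bool.not_true] at hx ⊢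
  cases hcv : PySem.Set.contains v x
  · rfl
  · rw [h x hcv] at hx; exact absurd hx (by simp)

theorem pv_contains_add_iff (v : PySem.Set String) (n x : String) :
    PySem.Set.contains (PySem.Set.add v n) x = true ↔ (PySem.Set.contains v x = true ∨ x = n) := by
  rw [PySem.Set.contains_iff, PySem.Set.mem_add, PySem.Set.contains_iff]

theorem remCnt_add_lt (U : List String) (v : PySem.Set String) (n : String)
    (hn : n ∈ U) (hc : PySem.Set.contains v n = false) :
    remCnt U (PySem.Set.add v n) < remCnt U v := by
  unfold remCnt
  rw [← List.countP_eq_length_filter, ← List.countP_eq_length_filter]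
  induction U with
  | nil => cases hn
  | cons u us ih =>
    rw [List.countP_cons, List.countP_cons]
    by_cases hu : u = n
    · subst hu
      have h1 : (!PySem.Set.contains (PySem.Set.add v u) u) = false := by
        rw [(pv_contains_add_iff v u u).2 (Or.inr rfl)]
        rfl
      have h2 : (!PySem.Set.contains v u) = true := by rw [hc]; rfl
      rw [h1, h2]
      simp only [Bool.false_eq_true, if_false, if_true]
      have hmono : List.countP (fun x => !PySem.Set.contains (PySem.Set.add v u) x) us
          ≤ List.countP (fun x => !PySem.Set.contains v x) us := by
        apply List.countP_mono_left
        intro x _ hx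
        simp only [Bool.not_eq_eq_eq_not, Bool.not_true] at hx ⊢
        cases hcv : PySem.Set.contains v x
        · rfl
        · rw [(pv_contains_add_iff v u x).2 (Or.inl hcv)] at hx
          exact absurd hx (by simp)
      omega
    · have hn' : n ∈ us := by cases hn with | head => exact absurd rfl hu | tail _ h => exact h
      have heq : (!PySem.Set.contains (PySem.Set.add v n) u) = (!PySem.Set.contains v u) := by
        by_cases hv : PySem.Set.contains v u = true
        · rw [hv, (pv_contains_add_iff v n u).2 (Or.inl hv)]
        · have hv' : PySem.Set.contains v u = false := by
            cases h : PySem.Set.contains v u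
            · rfl
            · exact absurd h hv
          rw [hv']
          have : PySem.Set.contains (PySem.Set.add v n) u = false := by
            cases h : PySem.Set.contains (PySem.Set.add v n) u
            · rfl
            · rcases (pv_contains_add_iff v n u).1 h with h1 | h1
              · exact absurd h1 hv
              · exact absurd h1 hu
          rw [this]
      rw [heq]
      have := ih hn'
      omega

theorem foldl_visitA_contains_mono (ch : String → List String) (f : Nat) (l : List String)
    (st : PySem.Set String × List String) (x : String)
    (h : PySem.Set.contains st.1 x = true) :
    PySem.Set.contains ((l.foldl (fun s n => visitA ch f n s) st)).1 x = true := by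
  induction l generalizing st with
  | nil => exact h
  | cons m ms ih => exact ih _ (visitA_contains_mono ch f m x st h)

theorem remCnt_visitA_le (ch : String → List String) (U : List String) (f : Nat) (n : String)
    (st : PySem.Set String × List String) :
    remCnt U (visitA ch f n st).1 ≤ remCnt U st.1 :=
  remCnt_le_of_mono U (fun x hx => visitA_contains_mono ch f n x st hx)

theorem remCnt_foldl_visitA_le (ch : String → List String) (U : List String) (f : Nat)
    (l : List String) (st : PySem.Set String × List String) :
    remCnt U ((l.foldl (fun s n => visitA ch f n s) st)).1 ≤ remCnt U st.1 :=
  remCnt_le_of_mono U (fun x hx => foldl_visitA_contains_mono ch f l st x hx)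

-- with enough fuel (more than the number of unvisited universe elements), the fuel does not matter
theorem visitA_irrel (ch : String → List String) (U : List String)
    (HU : ∀ k x, x ∈ ch k → x ∈ U) :
    ∀ (N f g : Nat) (n : String) (st : PySem.Set String × List String),
      n ∈ U → remCnt U st.1 ≤ N → remCnt U st.1 < f → remCnt U st.1 < g →
      visitA ch f n st = visitA ch g n st := by
  intro N
  induction N using Nat.strong_induction_on with
  | _ N IH =>
    intro f g n st hn hN hf hg
    by_cases hc : PySem.Set.contains st.1 n = true
    · rw [visitA_visited _ _ _ _ hc, visitA_visited _ _ _ _ hc]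
    · have hc' : PySem.Set.contains st.1 n = false := by
        cases h : PySem.Set.contains st.1 n
        · rfl
        · exact absurd h hc
      cases f with
      | zero => omega
      | succ f' =>
        cases g with
        | zero => omega
        | succ g' =>
          rw [visitA_succ _ _ _ _ hc', visitA_succ _ _ _ _ hc']
          have hrem' : remCnt U (PySem.Set.add st.1 n) < remCnt U st.1 :=
            remCnt_add_lt U st.1 n hn hc'
          have key : ∀ (l : List String), (∀ x ∈ l, x ∈ U) →
              ∀ (s : PySem.Set String × List String),
                remCnt U s.1 ≤ remCnt U (PySem.Set.add st.1 n) →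
                l.foldl (fun s m => visitA ch f' m s) s = l.foldl (fun s m => visitA ch g' m s) s := by
            intro l hl
            induction l with
            | nil => intro s _; rfl
            | cons m ms ihl =>
              intro s hs
              have h1 : visitA ch f' m s = visitA ch g' m s := by
                apply IH (remCnt U (PySem.Set.add st.1 n)) (by omega) f' g' m s
                  (hl m (List.mem_cons_self)) hs (by omega) (by omega)
              simp only [List.foldl_cons]
              rw [h1]
              exact ihl (fun x hx => hl x (List.mem_cons_of_mem _ hx)) _
                (le_trans (remCnt_visitA_le ch U g' m s) hs)
          exact key (ch n) (HU n) _ le_rfl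

theorem foldl_visitA_irrel (ch : String → List String) (U : List String)
    (HU : ∀ k x, x ∈ ch k → x ∈ U) (f g : Nat) (l : List String)
    (st : PySem.Set String × List String)
    (hl : ∀ x ∈ l, x ∈ U) (hf : remCnt U st.1 < f) (hg : remCnt U st.1 < g) :
    l.foldl (fun s n => visitA ch f n s) st = l.foldl (fun s n => visitA ch g n s) st := by
  induction l generalizing st with
  | nil => rfl
  | cons m ms ih =>
    have h1 : visitA ch f m st = visitA ch g m st :=
      visitA_irrel ch U HU (remCnt U st.1) f g m st (hl m (List.mem_cons_self)) le_rfl hf hg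
    simp only [List.foldl_cons]
    rw [h1]
    exact ih _ (fun x hx => hl x (List.mem_cons_of_mem _ hx))
      (lt_of_le_of_lt (remCnt_visitA_le ch U g m st) hf)
      (lt_of_le_of_lt (remCnt_visitA_le ch U g m st) hg)

-- the explicit-stack DFS computes the recursive DFS, seed by seed
theorem dfsB_eq_foldl_visitA (ch : String → List String) (U : List String)
    (HU : ∀ k x, x ∈ ch k → x ∈ U) :
    ∀ (f : Nat) (stack : List String) (st : PySem.Set String × List String),
      (∀ x ∈ stack, x ∈ U) → remCnt U st.1 < f →
      dfsB ch f stack st = stack.foldl (fun s n => visitA ch f n s) st := by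
  intro f
  induction f with
  | zero => intro stack st _ hf; omega
  | succ f ihf =>
    intro stack
    induction stack with
    | nil => intro st _ _; rw [dfsB_nil]; rfl
    | cons n rest ihs =>
      intro st hmem hf
      by_cases hc : PySem.Set.contains st.1 n = true
      · rw [dfsB_cons_visited _ _ _ _ _ hc,
          ihs st (fun x hx => hmem x (List.mem_cons_of_mem _ hx)) hf]
        simp only [List.foldl_cons]
        rw [visitA_visited _ _ _ _ hc]
      · have hc' : PySem.Set.contains st.1 n = false := by
          cases h : PySem.Set.contains st.1 n
          · rfl
          · exact absurd h hc
        have hnU : n ∈ U := hmem n List.mem_cons_self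
        have hrem' : remCnt U (PySem.Set.add st.1 n) < f :=
          lt_of_lt_of_le (remCnt_add_lt U st.1 n hnU hc') (by omega)
        rw [dfsB_cons_new _ _ _ _ _ hc']
        rw [ihf (ch n ++ rest) _
          (by intro x hx
              rcases List.mem_append.1 hx with hx | hx
              · exact HU n x hx
              · exact hmem x (List.mem_cons_of_mem _ hx))
          hrem']
        rw [List.foldl_append]
        simp only [List.foldl_cons]
        rw [visitA_succ _ _ _ _ hc']
        apply foldl_visitA_irrel ch U HU f (f + 1) rest _
          (fun x hx => hmem x (List.mem_cons_of_mem _ hx))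
        · exact lt_of_le_of_lt
            (remCnt_foldl_visitA_le ch U f (ch n) (PySem.Set.add st.1 n, st.2 ++ [n])) hrem'
        · exact lt_of_le_of_lt
            (remCnt_foldl_visitA_le ch U f (ch n) (PySem.Set.add st.1 n, st.2 ++ [n]))
            (lt_trans hrem' (by omega))

theorem dfsB_seed_eq_visitA (ch : String → List String) (U : List String)
    (HU : ∀ k x, x ∈ ch k → x ∈ U) (n : String) (hn : n ∈ U)
    (st : PySem.Set String × List String) :
    dfsB ch (U.length + 1) [n] st = visitA ch (U.length + 1) n st := by
  rw [dfsB_eq_foldl_visitA ch U HU (U.length + 1) [n] st (by simpa using hn)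
    (lt_of_le_of_lt (remCnt_le_length U st.1) (by omega))]
  rfl

-- seeds that are already visited at the start can be dropped from a seed list
theorem foldl_visitA_filter (ch : String → List String) (f : Nat) :
    ∀ (l : List String) (st s : PySem.Set String × List String),
      (∀ x, PySem.Set.contains st.1 x = true → PySem.Set.contains s.1 x = true) →
      (l.filter (fun n => !(PySem.Set.contains st.1 n))).foldl (fun s n => visitA ch f n s) s
        = l.foldl (fun s n => visitA ch f n s) s := by
  intro l
  induction l with
  | nil => intro st s _; rfl
  | cons n rest ih =>
    intro st s h
    by_cases hc : PySem.Set.contains st.1 n = true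
    · rw [List.filter_cons_of_neg (by rw [hc]; simp)]
      simp only [List.foldl_cons]
      rw [visitA_visited _ _ _ _ (h n hc)]
      exact ih st s h
    · rw [List.filter_cons_of_pos (by
        cases hcc : PySem.Set.contains st.1 n
        · simp
        · exact absurd hcc hc)]
      simp only [List.foldl_cons]
      exact ih st _ (fun x hx => visitA_contains_mono ch f n x s (h x hx))

-- every name visitA ever marks satisfies any property held by the seed, the children lists
-- and the initially marked names
theorem visitA_marks (ch : String → List String) (Q : String → Prop)
    (hQ : ∀ k x, x ∈ ch k → Q x) :
    ∀ (f : Nat) (n : String) (st : PySem.Set String × List String),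
      Q n → (∀ x, PySem.Set.contains st.1 x = true → Q x) →
      ∀ x, PySem.Set.contains (visitA ch f n st).1 x = true → Q x := by
  intro f
  induction f with
  | zero => intro n st _ hst x hx; rw [visitA_zero] at hx; exact hst x hx
  | succ f ih =>
    intro n st hn hst x hx
    by_cases hc : PySem.Set.contains st.1 n = true
    · rw [visitA_visited _ _ _ _ hc] at hx; exact hst x hx
    · have hc' : PySem.Set.contains st.1 n = false := by
        cases h : PySem.Set.contains st.1 n
        · rfl
        · exact absurd h hc
      rw [visitA_succ _ _ _ _ hc'] at hx
      have hst' : ∀ y, PySem.Set.contains (PySem.Set.add st.1 n) y = true → Q y := by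
        intro y hy
        rcases (pv_contains_add_iff st.1 n y).1 hy with hy | hy
        · exact hst y hy
        · rw [hy]; exact hn
      have key : ∀ (l : List String), (∀ m ∈ l, Q m) →
          ∀ (s : PySem.Set String × List String), (∀ y, PySem.Set.contains s.1 y = true → Q y) →
          ∀ y, PySem.Set.contains ((l.foldl (fun s m => visitA ch f m s) s)).1 y = true → Q y := by
        intro l hl
        induction l with
        | nil => intro s hs y hy; exact hs y hy
        | cons m ms ihl =>
          intro s hs y hy
          simp only [List.foldl_cons] at hy
          exact ihl (fun z hz => hl z (List.mem_cons_of_mem _ hz)) _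
            (fun z hz => ih m s (hl m List.mem_cons_self) hs z hz) y hy
      exact key (ch n) (hQ n) _ hst' x hx

theorem foldl_visitA_marks (ch : String → List String) (Q : String → Prop)
    (hQ : ∀ k x, x ∈ ch k → Q x) (f : Nat) (l : List String)
    (st : PySem.Set String × List String)
    (hl : ∀ m ∈ l, Q m) (hst : ∀ x, PySem.Set.contains st.1 x = true → Q x) :
    ∀ x, PySem.Set.contains ((l.foldl (fun s n => visitA ch f n s) st)).1 x = true → Q x := by
  induction l generalizing st with
  | nil => exact hst
  | cons m ms ih =>
    intro x hx
    simp only [List.foldl_cons] at hx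
    exact ih _ (fun z hz => hl z (List.mem_cons_of_mem _ hz))
      (fun z hz => visitA_marks ch Q hQ f m st (hl m List.mem_cons_self) hst z hz) x hx

-- A's final loop over `missing` appends it verbatim when none of it was visited
theorem foldl_missing_append :
    ∀ (m : List String) (st : PySem.Set String × List String),
      (∀ x ∈ m, PySem.Set.contains st.1 x = false) → m.Nodup →
      ((m.foldl (fun st n => if PySem.Set.contains st.1 n then st
          else (PySem.Set.add st.1 n, st.2 ++ [n])) st)).2 = st.2 ++ m := by
  intro m
  induction m with
  | nil => intro st _ _; simp
  | cons n ms ih =>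
    intro st h hnd
    have hc : PySem.Set.contains st.1 n = false := h n List.mem_cons_self
    simp only [List.foldl_cons]
    rw [if_neg (fun hm => by rw [hm] at hc; exact absurd hc (by simp))]
    rw [ih _ ?_ hnd.of_cons]
    · simp
    · intro x hx
      have hxn : x ≠ n := by
        intro hxy
        subst hxy
        exact (List.nodup_cons.1 hnd).1 hx
      have hcx : PySem.Set.contains st.1 x = false := h x (List.mem_cons_of_mem _ hx)
      cases hax : PySem.Set.contains (PySem.Set.add st.1 n) x
      · rfl
      · rcases (pv_contains_add_iff st.1 n x).1 hax with h1 | h1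
        · rw [h1] at hcx; exact absurd hcx (by simp)
        · exact absurd h1 hxn

-- A's three `sort(key=sort_key)` calls are no-ops: each sorted list is strictly increasing
-- under the first key component already
theorem foldl_insertBy_sorted_aux (k1 : String → Int) (k2 : String → String) :
    ∀ (xs acc : List String), (acc ++ xs).Pairwise (fun a b => k1 a < k1 b) →
      xs.foldl (fun acc x => PySem.List.insertBy
        (fun a b => decide (k1 a < k1 b) || (!decide (k1 b < k1 a) && decide (k2 a < k2 b)))
        x acc) acc = acc ++ xs := by
  intro xs
  induction xs with
  | nil => intro acc _; simp
  | cons x rest ih =>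
    intro acc h
    simp only [List.foldl_cons]
    have hins : PySem.List.insertBy
        (fun a b => decide (k1 a < k1 b) || (!decide (k1 b < k1 a) && decide (k2 a < k2 b)))
        x acc = acc ++ [x] := by
      apply PySem.List.insertBy_of_forall_not_before
      intro y hy
      have hyx : k1 y < k1 x :=
        (List.pairwise_append.1 h).2.2 y hy x List.mem_cons_self
      have h1 : ¬ (k1 x < k1 y) := lt_asymm hyx
      simp [h1, hyx]
    rw [hins]
    rw [ih (acc ++ [x]) (by simpa using h)]
    simp

theorem sorted2_noop (k1 : String → Int) (k2 : String → String) (xs : List String)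
    (h : xs.Pairwise (fun a b => k1 a < k1 b)) :
    PySem.List.sorted2 xs k1 k2 = xs := by
  show xs.foldl (fun acc x => PySem.List.insertBy
      (fun a b => decide (k1 a < k1 b) || (!decide (k1 b < k1 a) && decide (k2 a < k2 b)))
      x acc) [] = xs
  rw [foldl_insertBy_sorted_aux k1 k2 xs [] (by simpa using h)]
  simp

-- the index map {name: idx for idx, name in enumerate(ordered_input)}
theorem enumerate_map_snd : ∀ (xs : List String) (s : Int),
    (PySem.List.enumerate xs s).map (fun p => p.2) = xs := by
  intro xs
  induction xs with
  | nil => intro s; rw [PySem.List.enumerate_nil]; rfl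
  | cons x rest ih =>
    intro s
    rw [PySem.List.enumerate_cons]
    simp only [List.map_cons]
    rw [ih]

theorem find?_enumerate_swap :
    ∀ (xs : List String) (s : Int) (i : Nat) (h : i < xs.length), xs.Nodup →
      List.find? (fun q => q.1 == xs[i])
        ((PySem.List.enumerate xs s).map (fun p => (p.2, p.1))) = some (xs[i], s + i) := by
  intro xs
  induction xs with
  | nil => intro s i h _; simp at h
  | cons x rest ih =>
    intro s i h hnd
    rw [PySem.List.enumerate_cons]
    simp only [List.map_cons]
    cases i with
    | zero =>
      rw [List.find?_cons_of_pos (by simp)]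
      simp
    | succ j =>
      have hj : j < rest.length := by simpa using h
      have hgx : (x :: rest)[j + 1] = rest[j] := by simp
      rw [hgx]
      have hne : x ≠ rest[j] := by
        intro hxe
        exact (List.nodup_cons.1 hnd).1 (hxe ▸ List.getElem_mem hj)
      rw [List.find?_cons_of_neg (by simp; exact fun hmm => absurd hmm.symm (fun hx => hne hx.symm))]
      rw [ih (s + 1) j hj (List.nodup_cons.1 hnd).2]
      congr 2
      push_cast
      omega

def pvIndexMap (L : List String) : PySem.Dict String Int :=
  (PySem.List.enumerate L).foldl (fun d p => d.insert p.2 p.1) ⟨[]⟩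

theorem pvIndexMap_getD (L : List String) (hnd : L.Nodup) (i : Nat) (h : i < L.length) :
    (pvIndexMap L).getD L[i] (10 ^ 9) = (i : Int) := by
  have hitems : (pvIndexMap L).items
      = (PySem.List.enumerate L).map (fun a => (a.2, a.1)) := by
    have := PySem.Dict.items_foldl_insert_fresh (PySem.List.enumerate L)
      (fun p => p.2) (fun p => p.1) PySem.Dict.empty
      (fun a _ => PySem.Dict.contains_empty _)
      (by rw [enumerate_map_snd]; exact hnd)
    simpa [PySem.Dict.empty] using this
  unfold PySem.Dict.getD PySem.Dict.get?
  rw [hitems, find?_enumerate_swap L 0 i h hnd]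
  simp

theorem pvIndexMap_pairwise (L : List String) (hnd : L.Nodup) :
    L.Pairwise (fun a b => (pvIndexMap L).getD a (10 ^ 9) < (pvIndexMap L).getD b (10 ^ 9)) := by
  rw [List.pairwise_iff_getElem]
  intro i j hi hj hij
  rw [pvIndexMap_getD L hnd i hi, pvIndexMap_getD L hnd j hj]
  exact_mod_cast hij

-- classification of each name: missing / child (with its effective parent) / root
def pvL (bn : List String) : List String :=
  PySem.List.dedup (bn.filter (fun n => !(n == "")))

def pvMissP (bd : List (String × List (String × String))) (n : String) : Bool :=
  (PySem.Dict.get? (⟨bd⟩ : PySem.Dict String (List (String × String))) n).isNone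

def pvPf (bd : List (String × List (String × String))) (S : PySem.Set String) (n : String) :
    Option String :=
  match PySem.Dict.get? (⟨bd⟩ : PySem.Dict String (List (String × String))) n with
  | none => none
  | some info =>
    match PySem.Dict.get? (⟨info⟩ : PySem.Dict String String) "parent" with
    | some p => if PySem.Set.contains S p && !(p == n) then some p else none
    | none => none

def pvRootP (bd : List (String × List (String × String))) (S : PySem.Set String) (n : String) :
    Bool :=
  !(pvMissP bd n) && (pvPf bd S n).isNone

theorem pvPf_some_not_missP (bd : List (String × List (String × String)))
    (S : PySem.Set String) (n p : String) (h : pvPf bd S n = some p) :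
    pvMissP bd n = false := by
  unfold pvPf at h
  unfold pvMissP
  cases hg : PySem.Dict.get? (⟨bd⟩ : PySem.Dict String (List (String × String))) n
  · rw [hg] at h; exact absurd h (by simp)
  · rfl

-- A's dedup loop produces pvL (paired with itself as the `seen` set)
theorem pvA_dedup (bn : List String) :
    bn.foldl
      (fun (acc : List String × PySem.Set String) n =>
        if !(n == "") && !(PySem.Set.contains acc.2 n) then (acc.1 ++ [n], PySem.Set.add acc.2 n)
        else acc)
      ([], PySem.Set.empty) = (pvL bn, pvL bn) := by
  have key : ∀ (l : List String) (o : List String),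
      l.foldl
        (fun (acc : List String × PySem.Set String) n =>
          if !(n == "") && !(PySem.Set.contains acc.2 n) then (acc.1 ++ [n], PySem.Set.add acc.2 n)
          else acc)
        (o, o)
      = (l.foldl (fun o n => if !(n == "") then PySem.Set.add o n else o) o,
         l.foldl (fun o n => if !(n == "") then PySem.Set.add o n else o) o) := by
    intro l
    induction l with
    | nil => intro o; rfl
    | cons n rest ih =>
      intro o
      simp only [List.foldl_cons]
      have hstep : (if !(n == "") && !(PySem.Set.contains o n) then (o ++ [n], PySem.Set.add o n)
            else ((o, o) : List String × PySem.Set String))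
          = ((if !(n == "") then PySem.Set.add o n else o),
             (if !(n == "") then PySem.Set.add o n else o)) := by
        by_cases he : (n == "") = true
        · simp [he]
        · have he' : (n == "") = false := by cases h : (n == "") <;> simp_all
          by_cases hc : PySem.Set.contains o n = true
          · have hmem : n ∈ o := (PySem.Set.contains_iff o n).1 hc
            have : PySem.Set.add o n = o := by unfold PySem.Set.add; rw [if_pos hc]
            simp [he', hmem]
          · have hc' : PySem.Set.contains o n = false := by
              cases h : PySem.Set.contains o n <;> simp_all
            have hmem : n ∉ o := pv_not_mem_of_contains_false hc'
            have : PySem.Set.add o n = o ++ [n] := by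
              unfold PySem.Set.add
              rw [if_neg (fun hm => by rw [hm] at hc'; exact absurd hc' (by simp))]
            simp [he', hmem]
      rw [hstep, ih]
  have h0 : (([], PySem.Set.empty) : List String × PySem.Set String) = (([] : List String), ([] : PySem.Set String)) := rfl
  rw [h0, key]
  have : (bn.foldl (fun o n => if !(n == "") then PySem.Set.add o n else o) [])
      = pvL bn := by
    rw [PySem.List.foldl_if_eq_foldl_filter (fun n => !(n == "")) PySem.Set.add bn []]
    rw [← PySem.Set.ofList_eq_foldl]
    unfold pvL
    rw [PySem.List.dedup_eq_ofList]
  rw [this]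

-- A's single classification loop splits into its three independent components
theorem pvA_classify (bd : List (String × List (String × String))) (S : PySem.Set String) :
    ∀ (l : List String) (c : PySem.Dict String (List String)) (r m : List String),
      l.foldl
        (fun (acc : PySem.Dict String (List String) × List String × List String) n =>
          match PySem.Dict.get? (⟨bd⟩ : PySem.Dict String (List (String × String))) n with
          | none => (acc.1, acc.2.1, acc.2.2 ++ [n])
          | some info =>
            match PySem.Dict.get? (⟨info⟩ : PySem.Dict String String) "parent" with
            | some p =>
              if PySem.Set.contains S p && !(p == n) then
                (acc.1.modify p [] (· ++ [n]), acc.2.1, acc.2.2)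
              else (acc.1, acc.2.1 ++ [n], acc.2.2)
            | none => (acc.1, acc.2.1 ++ [n], acc.2.2))
        (c, r, m)
      = (l.foldl
          (fun d n => match pvPf bd S n with
            | some p => d.modify p [] (· ++ [n])
            | none => d) c,
         r ++ l.filter (pvRootP bd S),
         m ++ l.filter (pvMissP bd)) := by
  intro l
  induction l with
  | nil => intro c r m; simp
  | cons n rest ih =>
    intro c r m
    simp only [List.foldl_cons, List.filter_cons]
    cases hg : PySem.Dict.get? (⟨bd⟩ : PySem.Dict String (List (String × String))) n with
    | none =>
      have hm : pvMissP bd n = true := by unfold pvMissP; rw [hg]; rfl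
      have hr : pvRootP bd S n = false := by unfold pvRootP; rw [hm]; rfl
      have hpf : pvPf bd S n = none := by unfold pvPf; rw [hg]
      dsimp only
      rw [ih, hpf, hm, hr]
      simp
    | some info =>
      have hm : pvMissP bd n = false := by unfold pvMissP; rw [hg]; rfl
      dsimp only
      cases hp : PySem.Dict.get? (⟨info⟩ : PySem.Dict String String) "parent" with
      | none =>
        have hpf : pvPf bd S n = none := by unfold pvPf; rw [hg]; dsimp only; rw [hp]
        have hr : pvRootP bd S n = true := by unfold pvRootP; rw [hm, hpf]; rfl
        dsimp only
        rw [ih, hpf, hm, hr]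
        simp
      | some p =>
        dsimp only
        by_cases hcond : (PySem.Set.contains S p && !(p == n)) = true
        · have hpf : pvPf bd S n = some p := by unfold pvPf; rw [hg]; dsimp only; rw [hp]; dsimp only; rw [if_pos hcond]
          have hr : pvRootP bd S n = false := by unfold pvRootP; rw [hpf]; simp
          rw [if_pos hcond, ih, hpf, hm, hr]
          simp
        · have hcond' : (PySem.Set.contains S p && !(p == n)) = false := by
            cases h : (PySem.Set.contains S p && !(p == n)) <;> simp_all
          have hpf : pvPf bd S n = none := by
            unfold pvPf; rw [hg]; dsimp only; rw [hp]; dsimp only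
            rw [if_neg (fun hmm => by rw [hmm] at hcond'; exact absurd hcond' (by simp))]
          have hr : pvRootP bd S n = true := by unfold pvRootP; rw [hm, hpf]; rfl
          rw [if_neg (fun hmm => by rw [hmm] at hcond'; exact absurd hcond' (by simp)), ih, hpf, hm, hr]
          simp

-- the children map seen through .get(c, []) is a filter of the traversal list
theorem pv_getD_foldl_cond_modify (pfn : String → Option String) :
    ∀ (l : List String) (d : PySem.Dict String (List String)) (c : String),
      (l.foldl
        (fun d n => match pfn n with
          | some p => d.modify p [] (· ++ [n])
          | none => d) d).getD c []
      = d.getD c [] ++ (l.filter (fun n => pfn n == some c)) := by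
  intro l
  induction l with
  | nil => intro d c; simp
  | cons n rest ih =>
    intro d c
    simp only [List.foldl_cons, List.filter_cons]
    cases hp : pfn n with
    | none =>
      rw [ih]
      simp
    | some p =>
      dsimp only
      rw [ih]
      show (PySem.Dict.insert d p (d.getD p [] ++ [n])).getD c [] ++ _ = _
      by_cases hc : c = p
      · subst hc
        rw [PySem.Dict.getD_insert_self]
        simp
      · rw [PySem.Dict.getD_insert_of_ne d _ [] (fun h => hc h)]
        have hpc : ((some p : Option String) == some c) = false := by
          simp
          exact fun h => hc h.symm
        rw [hpc]
        simp

-- Python's children.setdefault(p, []).append(n) equals the defaultdict append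
theorem pv_setdefault_modify (d : PySem.Dict String (List String)) (k : String)
    (f : List String → List String) :
    (d.setdefault k []).modify k [] f = d.modify k [] f := by
  by_cases hc : d.contains k = true
  · rw [PySem.Dict.setdefault_of_contains d [] hc]
  · have hc' : d.contains k = false := by cases h : d.contains k <;> simp_all
    rw [PySem.Dict.setdefault_of_not_contains d [] hc']
    show (d.insert k []).insert k (f ((d.insert k []).getD k [])) = d.insert k (f (d.getD k []))
    rw [PySem.Dict.getD_insert_self, PySem.Dict.insert_insert_self]
    have hg : d.get? k = none := by
      unfold PySem.Dict.get? PySem.Dict.contains at *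
      rw [List.find?_eq_none.2 (fun x hx => List.any_eq_false.mp hc' x hx)]
      rfl
    unfold PySem.Dict.getD
    rw [hg]
    rfl

-- a dict whose values were rewritten in place, seen through .get?
theorem pv_get?_mapValues (d : PySem.Dict String (List String))
    (f : List String → List String) (c : String) :
    PySem.Dict.get? (⟨d.items.map (fun kv => (kv.1, f kv.2))⟩ : PySem.Dict String (List String)) c
      = (d.get? c).map f := by
  unfold PySem.Dict.get?
  rw [List.find?_map]
  have hcomp : ((fun (p : String × List String) => p.1 == c) ∘ (fun kv : String × List String => (kv.1, f kv.2)))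
      = (fun p : String × List String => p.1 == c) := rfl
  rw [hcomp]
  cases List.find? (fun p : String × List String => p.1 == c) d.items <;> simp

-- the common canonical form both ports are reduced to
def pvChF (bn : List String) (bd : List (String × List (String × String))) :
    String → List String :=
  fun c => (pvL bn).filter (fun n => pvPf bd (PySem.Set.ofList (pvL bn)) n == some c)

def pvCanon (bn : List String) (bd : List (String × List (String × String))) : List String :=
  (((pvL bn).filter (fun n => !(pvMissP bd n))).foldl
     (fun st n => visitA (pvChF bn bd) ((pvL bn).length + 1) n st)
     (((pvL bn).filter (pvRootP bd (PySem.Set.ofList (pvL bn)))).foldl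
        (fun st n => visitA (pvChF bn bd) ((pvL bn).length + 1) n st)
        (PySem.Set.empty, []))).2
  ++ (pvL bn).filter (pvMissP bd)

theorem pvChF_subset (bn : List String) (bd : List (String × List (String × String))) :
    ∀ k x, x ∈ pvChF bn bd k → x ∈ pvL bn := by
  intro k x hx
  exact (List.mem_filter.1 hx).1

theorem pvPf_none_of_missP (bd : List (String × List (String × String)))
    (S : PySem.Set String) (n : String) (h : pvMissP bd n = true) :
    pvPf bd S n = none := by
  unfold pvMissP at h
  unfold pvPf
  rw [Option.isNone_iff_eq_none.1 h]

theorem pvB_realParent_apply (bd : List (String × List (String × String)))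
    (L : List String) (n : String) :
    (match PySem.Dict.get? (⟨PySem.Dict.getD (⟨bd⟩ : PySem.Dict String (List (String × String))) n []⟩ : PySem.Dict String String) "parent" with
      | some p => if PySem.Set.contains (PySem.Set.ofList L) p && !(p == n) then some p else none
      | none => none)
      = pvPf bd (PySem.Set.ofList L) n := by
  unfold pvPf PySem.Dict.getD
  cases hg : PySem.Dict.get? (⟨bd⟩ : PySem.Dict String (List (String × String))) n
  · rfl
  · rfl

theorem pvB_chF_apply (bn : List String) (bd : List (String × List (String × String))) (c : String) :
    (((pvL bn).filter (fun n => !(pvMissP bd n))).foldl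
      (fun d n => match pvPf bd (PySem.Set.ofList (pvL bn)) n with
        | some p => d.modify p [] (· ++ [n])
        | none => d) (⟨[]⟩ : PySem.Dict String (List String))).getD c []
    = pvChF bn bd c := by
  rw [pv_getD_foldl_cond_modify]
  rw [List.filter_filter]
  unfold pvChF
  have h0 : (⟨[]⟩ : PySem.Dict String (List String)).getD c [] = [] := rfl
  rw [h0, List.nil_append]
  apply List.filter_congr
  intro n hn
  cases hm : pvMissP bd n
  · simp
  · rw [pvPf_none_of_missP bd _ n hm]
    simp

theorem pvMissP_def (bd : List (String × List (String × String))) (n : String) :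
    (PySem.Dict.get? (⟨bd⟩ : PySem.Dict String (List (String × String))) n).isNone
      = pvMissP bd n := rfl

theorem pvB_eq_canon (bn : List String) (bd : List (String × List (String × String))) :
    order_bones_by_hierarchy_alt bn bd = pvCanon bn bd := by
  unfold order_bones_by_hierarchy_alt
  dsimp only
  rw [show PySem.List.dedup (List.filter (fun n => !(n == "")) bn) = pvL bn from rfl]
  simp only [pvB_realParent_apply bd (pvL bn)]
  simp only [pv_setdefault_modify]
  simp only [pvMissP_def]
  simp only [pvB_chF_apply]
  rw [List.filter_filter]
  have hroots : List.filter (fun a => (pvPf bd (PySem.Set.ofList (pvL bn)) a).isNone && !(pvMissP bd a)) (pvL bn)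
      = List.filter (pvRootP bd (PySem.Set.ofList (pvL bn))) (pvL bn) :=
    List.filter_congr (fun n _ => by unfold pvRootP; rw [Bool.and_comm])
  rw [hroots]
  rw [PySem.List.foldl_congr_mem _
    (fun st n => dfsB (pvChF bn bd) ((pvL bn).length + 1) [n] st)
    (fun st n => visitA (pvChF bn bd) ((pvL bn).length + 1) n st) _
    (fun acc x hx => dfsB_seed_eq_visitA (pvChF bn bd) (pvL bn) (pvChF_subset bn bd) x
      (List.mem_filter.1 hx).1 acc)]
  rw [PySem.List.foldl_congr_mem _
    (fun st n => dfsB (pvChF bn bd) ((pvL bn).length + 1) [n] st)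
    (fun st n => visitA (pvChF bn bd) ((pvL bn).length + 1) n st) _
    (fun acc x hx => dfsB_seed_eq_visitA (pvChF bn bd) (pvL bn) (pvChF_subset bn bd) x
      (List.mem_filter.1 hx).1 acc)]
  rfl

theorem pvL_nodup (bn : List String) : (pvL bn).Nodup := PySem.List.nodup_dedup _

theorem pv_getD_eq {κ ν : Type} [BEq κ] (d : PySem.Dict κ ν) (k : κ) (dflt : ν) :
    d.getD k dflt = (d.get? k).getD dflt := rfl

theorem pvA_chF_apply (bn : List String) (bd : List (String × List (String × String))) (c : String) :
    PySem.Dict.getD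
      (⟨((pvL bn).foldl
          (fun d n => match pvPf bd (PySem.Set.ofList (pvL bn)) n with
            | some p => d.modify p [] (· ++ [n])
            | none => d) (⟨[]⟩ : PySem.Dict String (List String))).items.map
          (fun kv => (kv.1, PySem.List.sorted2 kv.2
            (fun name => (pvIndexMap (pvL bn)).getD name (10 ^ 9)) (fun name => name)))⟩
        : PySem.Dict String (List String)) c []
    = pvChF bn bd c := by
  have hch : ((pvL bn).foldl
      (fun d n => match pvPf bd (PySem.Set.ofList (pvL bn)) n with
        | some p => d.modify p [] (· ++ [n])
        | none => d) (⟨[]⟩ : PySem.Dict String (List String))).getD c []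
      = pvChF bn bd c := by
    rw [pv_getD_foldl_cond_modify]
    rfl
  rw [pv_getD_eq]
  rw [pv_get?_mapValues ((pvL bn).foldl
      (fun d n => match pvPf bd (PySem.Set.ofList (pvL bn)) n with
        | some p => d.modify p [] (· ++ [n])
        | none => d) (⟨[]⟩ : PySem.Dict String (List String)))
    (fun v => PySem.List.sorted2 v
      (fun name => (pvIndexMap (pvL bn)).getD name (10 ^ 9)) (fun name => name)) c]
  rw [pv_getD_eq] at hch
  cases hq : ((pvL bn).foldl
      (fun d n => match pvPf bd (PySem.Set.ofList (pvL bn)) n with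
        | some p => d.modify p [] (· ++ [n])
        | none => d) (⟨[]⟩ : PySem.Dict String (List String))).get? c with
  | none =>
    rw [hq] at hch
    simpa using hch
  | some v =>
    rw [hq] at hch
    simp only [Option.getD_some] at hch
    simp only [Option.map_some, Option.getD_some]
    rw [hch]
    apply sorted2_noop
    unfold pvChF
    exact (pvIndexMap_pairwise _ (pvL_nodup bn)).filter _

theorem pvA_remaining (bn : List String) (bd : List (String × List (String × String)))
    (st1 : PySem.Set String × List String) :
    (PySem.List.sorted2
      ((pvL bn).filter (fun n => !(PySem.Set.contains st1.1 n)
        && !(((pvL bn).filter (pvMissP bd)).contains n)))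
      (fun name => (pvIndexMap (pvL bn)).getD name (10 ^ 9)) (fun name => name)).foldl
        (fun st n => visitA (pvChF bn bd) ((pvL bn).length + 1) n st) st1
    = ((pvL bn).filter (fun n => !(pvMissP bd n))).foldl
        (fun st n => visitA (pvChF bn bd) ((pvL bn).length + 1) n st) st1 := by
  rw [sorted2_noop _ _ _ ((pvIndexMap_pairwise _ (pvL_nodup bn)).filter _)]
  have hcongr : (pvL bn).filter (fun n => !(PySem.Set.contains st1.1 n)
        && !(((pvL bn).filter (pvMissP bd)).contains n))
      = (pvL bn).filter (fun n => !(PySem.Set.contains st1.1 n) && !(pvMissP bd n)) := by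
    apply List.filter_congr
    intro n hn
    have hc : ((pvL bn).filter (pvMissP bd)).contains n = pvMissP bd n := by
      cases hm : pvMissP bd n
      · have : n ∉ (pvL bn).filter (pvMissP bd) := by simp [List.mem_filter, hm]
        cases hcc : ((pvL bn).filter (pvMissP bd)).contains n
        · rfl
        · exact absurd ((List.contains_iff_mem).1 hcc) this
      · have : n ∈ (pvL bn).filter (pvMissP bd) := List.mem_filter.2 ⟨hn, hm⟩
        simp [this]
    rw [hc]
  rw [hcongr]
  rw [show (pvL bn).filter (fun n => !(PySem.Set.contains st1.1 n) && !(pvMissP bd n))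
      = ((pvL bn).filter (fun n => !(pvMissP bd n))).filter (fun n => !(PySem.Set.contains st1.1 n))
    from (List.filter_filter).symm]
  exact foldl_visitA_filter (pvChF bn bd) ((pvL bn).length + 1)
    ((pvL bn).filter (fun n => !(pvMissP bd n))) st1 st1 (fun x hx => hx)

theorem pvA_eq_canon (bn : List String) (bd : List (String × List (String × String)))
    (hbn : bn ≠ []) :
    order_bones_by_hierarchy bn bd = pvCanon bn bd := by
  unfold order_bones_by_hierarchy
  rw [if_neg hbn]
  dsimp only
  rw [pvA_dedup bn]
  dsimp only
  rw [show ((PySem.List.enumerate (pvL bn)).foldl (fun d p => d.insert p.2 p.1)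
      (⟨[]⟩ : PySem.Dict String Int)) = pvIndexMap (pvL bn) from rfl]
  rw [pvA_classify bd (PySem.Set.ofList (pvL bn)) (pvL bn) ⟨[]⟩ [] []]
  dsimp only
  rw [List.nil_append, List.nil_append]
  rw [sorted2_noop _ _ _ ((pvIndexMap_pairwise _ (pvL_nodup bn)).filter _)]
  simp only [pvA_chF_apply]
  rw [pvA_remaining bn bd]
  have hQch : ∀ k x, x ∈ pvChF bn bd k → pvMissP bd x = false := by
    intro k x hx
    have h2 := (List.mem_filter.1 hx).2
    have h3 : pvPf bd (PySem.Set.ofList (pvL bn)) x = some k := by simpa using h2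
    exact pvPf_some_not_missP _ _ _ _ h3
  have hst2Q : ∀ x, PySem.Set.contains
      (((pvL bn).filter (fun n => !(pvMissP bd n))).foldl
        (fun st n => visitA (pvChF bn bd) ((pvL bn).length + 1) n st)
        (((pvL bn).filter (pvRootP bd (PySem.Set.ofList (pvL bn)))).foldl
          (fun st n => visitA (pvChF bn bd) ((pvL bn).length + 1) n st)
          (PySem.Set.empty, []))).1 x = true → pvMissP bd x = false := by
    apply foldl_visitA_marks _ _ hQch
    · intro m hm
      have := (List.mem_filter.1 hm).2
      simpa using this
    · apply foldl_visitA_marks _ _ hQch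
      · intro m hm
        have h2 := (List.mem_filter.1 hm).2
        unfold pvRootP at h2
        have h3 : (!(pvMissP bd m)) = true ∧ (pvPf bd (PySem.Set.ofList (pvL bn)) m).isNone = true := by
          simpa using h2
        simpa using h3.1
      · intro x hx
        exact absurd hx (by simp [PySem.Set.contains, PySem.Set.empty])
  have hunvis : ∀ x ∈ (pvL bn).filter (pvMissP bd), PySem.Set.contains
      (((pvL bn).filter (fun n => !(pvMissP bd n))).foldl
        (fun st n => visitA (pvChF bn bd) ((pvL bn).length + 1) n st)
        (((pvL bn).filter (pvRootP bd (PySem.Set.ofList (pvL bn)))).foldl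
          (fun st n => visitA (pvChF bn bd) ((pvL bn).length + 1) n st)
          (PySem.Set.empty, []))).1 x = false := by
    intro x hx
    cases hcx : PySem.Set.contains
      (((pvL bn).filter (fun n => !(pvMissP bd n))).foldl
        (fun st n => visitA (pvChF bn bd) ((pvL bn).length + 1) n st)
        (((pvL bn).filter (pvRootP bd (PySem.Set.ofList (pvL bn)))).foldl
          (fun st n => visitA (pvChF bn bd) ((pvL bn).length + 1) n st)
          (PySem.Set.empty, []))).1 x
    · rfl
    · have hQx := hst2Q x hcx
      have hmx : pvMissP bd x = true := (List.mem_filter.1 hx).2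
      rw [hmx] at hQx
      exact absurd hQx (by simp)
  rw [foldl_missing_append ((pvL bn).filter (pvMissP bd)) _ hunvis ((pvL_nodup bn).filter _)]
  unfold pvCanon
  rfl

-- ===== VERDICT (by name: the statement is the Claim_ definition above) =====
theorem order_bones_by_hierarchy_spec : Claim_equal_order_bones_by_hierarchy := by
  unfold Claim_equal_order_bones_by_hierarchy
  intro bn bd _
  unfold Spec_order_bones_by_hierarchy
  by_cases hbn : bn = []
  · subst hbn
    rfl
  · rw [pvA_eq_canon bn bd hbn, pvB_eq_canon bn bd]
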